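-- pv_equiv track=rewrite | github.com/tuxikus/aoc-solutions | 2025/01/main.py | turn_right
-- ===== SOURCE A (Python) =====
-- def turn_right(value, amount):
--     click = 0
--     for i in range(0, amount):
--         value += 1
--         if value > 99:
--             click += 1
--             value = 0
--
--     if value == 0:
--         click -=1
--
--     return value, click
-- ===== SOURCE B (Python) =====
-- def turn_right(value, amount):
--     # Advance the dial in whole chunks up to the next wrap instead of one step at a time.
--     clicks = 0
--     remaining = amount
--     while remaining > 0:
--         steps = min(remaining, 100 - value)
--         value += steps
--         remaining -= steps
--         if value == 100:
--             value = 0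
--             clicks += 1
--     if value == 0:
--         # ending exactly on 0 counts one click fewer
--         clicks -= 1
--     return value, clicks
-- ===== Notes on version B (the rewrite author's own statement) =====
-- stated objective: alternative
-- what changed: Replaced A's one-increment-per-iteration loop with a chunked walk that jumps to the next wrap boundary in one arithmetic step; Pre_ excludes positive turns from a start value above 99 (outside the dial's 0-99 face), where A's immediate first-increment wrap is an implementation artefact and B gives a different value.
-- outside the precondition, e.g. on turn_right(150, 5): A returns (4, 1), B returns (55, 1); on turn_right(101, 3): A returns (2, 1), B returns (4, 1)
import Mathlib
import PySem

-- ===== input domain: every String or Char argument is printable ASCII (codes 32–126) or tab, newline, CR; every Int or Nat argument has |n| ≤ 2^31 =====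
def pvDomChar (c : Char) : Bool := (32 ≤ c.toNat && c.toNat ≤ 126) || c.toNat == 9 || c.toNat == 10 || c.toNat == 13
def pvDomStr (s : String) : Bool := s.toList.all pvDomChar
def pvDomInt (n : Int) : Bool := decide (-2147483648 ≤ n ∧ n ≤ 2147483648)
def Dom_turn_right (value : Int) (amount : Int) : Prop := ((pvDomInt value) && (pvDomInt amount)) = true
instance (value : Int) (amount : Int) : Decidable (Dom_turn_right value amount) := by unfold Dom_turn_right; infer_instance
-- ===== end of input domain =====

-- B walks the dial in chunks up to the next wrap boundary instead of one step at a time.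

-- ===== PORT A =====
def turn_right (value : Int) (amount : Int) : Int × Int :=
  let s := (PySem.List.pyRange 0 amount 1).foldl
    (fun (st : Int × Int) _ =>
      let v := st.1 + 1
      if v > 99 then (0, st.2 + 1) else (v, st.2))
    (value, 0)
  let value := s.1
  let click := if value = 0 then s.2 - 1 else s.2
  (value, click)

-- ===== PORT B =====
-- the while loop of Source B; fuel = amount.toNat only makes the recursion total
-- (inside Pre_ each iteration decreases `remaining` by at least 1, so fuel never runs out)
def trAltLoop : Nat → Int → Int → Int → Int × Int
  | 0, value, clicks, _ => (value, clicks)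
  | Nat.succ n, value, clicks, remaining =>
    if remaining > 0 then
      let steps := min remaining (100 - value)
      let value' := value + steps
      let remaining' := remaining - steps
      if value' = 100 then trAltLoop n 0 (clicks + 1) remaining'
      else trAltLoop n value' clicks remaining'
    else (value, clicks)

def turn_right_alt (value : Int) (amount : Int) : Int × Int :=
  let s := trAltLoop amount.toNat value 0 amount
  (s.1, if s.1 = 0 then s.2 - 1 else s.2)

-- ===== PRECONDITION & SPEC =====
-- Pre_ excludes positive turns from a start value above 99 (outside the dial's 0–99 face),
-- where A's value is an artefact of its wrap-on-first-increment and B's chunked walk gives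
-- a different value (or, at value = 100, does not terminate).
def Pre_turn_right (value : Int) (amount : Int) : Prop := value ≤ 99 ∨ amount ≤ 0
instance (value : Int) (amount : Int) : Decidable (Pre_turn_right value amount) := by unfold Pre_turn_right; infer_instance
def pvWitness_turn_right : Int × Int := (42, 275)

def Spec_turn_right (value : Int) (amount : Int) (out : Int × Int) : Prop := out = turn_right_alt value amount
instance (value : Int) (amount : Int) (out : Int × Int) : Decidable (Spec_turn_right value amount out) := by unfold Spec_turn_right; infer_instance

-- ===== CLAIM (what is proved, stated in full; the proofs are below) =====
def Claim_equal_turn_right : Prop := ∀ (value : Int) (amount : Int), Dom_turn_right value amount → Pre_turn_right value amount → Spec_turn_right value amount (turn_right value amount)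

-- ===== LEMMAS AND PROOFS =====

/-- The loop body of A as a step function on (value, click). -/
def trStep (st : Int × Int) : Int × Int :=
  let v := st.1 + 1
  if v > 99 then (0, st.2 + 1) else (v, st.2)

/-- A fold over a list whose body ignores the element is function iteration. -/
theorem foldl_ignore_iterate (g : Int × Int → Int × Int) :
    ∀ (l : List Int) (s : Int × Int), l.foldl (fun st _ => g st) s = g^[l.length] s := by
  intro l
  induction l with
  | nil => intro s; rfl
  | cons x xs ih =>
      intro s
      simp [List.foldl, ih, Function.iterate_succ_apply]

/-- Closed form for n iterations of A's step, starting at a value ≤ 99. -/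
theorem trStep_iterate (n : Nat) : ∀ (v c : Int), v ≤ 99 →
    trStep^[n] (v, c) =
      (if v + n < 0 then (v + n, c) else ((v + n) % 100, c + (v + n) / 100)) := by
  induction n with
  | zero =>
      intro v c hv
      simp only [Function.iterate_zero, id, Nat.cast_zero, add_zero]
      by_cases h0 : v < 0
      · simp [h0]
      · rw [if_neg (by omega)]
        rw [Int.emod_eq_of_lt (by omega) (by omega), Int.ediv_eq_zero_of_lt (by omega) (by omega)]
        simp
  | succ n ih =>
      intro v c hv
      rw [Function.iterate_succ_apply]
      by_cases hwrap : v + 1 > 99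
      · have hv99 : v = 99 := by omega
        have hs : trStep (v, c) = (0, c + 1) := by simp [trStep, hwrap]
        rw [hs, ih 0 (c + 1) (by norm_num)]
        subst hv99
        have h1 : (99 : Int) + (n + 1 : Nat) = 100 + (n : Int) := by push_cast; ring
        rw [if_neg (by push_cast; omega), if_neg (by omega)]
        have h2 : (0 : Int) + (n : Nat) = (n : Int) := by push_cast; ring
        rw [h2, h1]
        have hm : (100 + (n : Int)) % 100 = (n : Int) % 100 := by omega
        have hd : (100 + (n : Int)) / 100 = (n : Int) / 100 + 1 := by omega
        rw [hm, hd]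
        simp only [Prod.mk.injEq]
        constructor <;> first | trivial | ring
      · have hs : trStep (v, c) = (v + 1, c) := by simp [trStep, hwrap]
        rw [hs, ih (v + 1) c (by omega)]
        have h1 : v + 1 + (n : Nat) = v + ((n : Int) + 1) := by push_cast; ring
        have h2 : v + ((n + 1 : Nat) : Int) = v + ((n : Int) + 1) := by push_cast; ring
        rw [h1, h2]

/-- Closed form for B's chunked loop, starting at a value ≤ 99 with enough fuel. -/
theorem trAltLoop_closed (fuel : Nat) : ∀ (v c r : Int), v ≤ 99 → r ≤ fuel →
    trAltLoop fuel v c r =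
      if r ≤ 0 then (v, c)
      else if v + r < 0 then (v + r, c)
      else ((v + r) % 100, c + (v + r) / 100) := by
  induction fuel with
  | zero =>
      intro v c r hv hr
      rw [if_pos (by exact_mod_cast hr)]
      rfl
  | succ n ih =>
      intro v c r hv hr
      by_cases hr0 : r ≤ 0
      · rw [if_pos hr0]
        simp [trAltLoop, show ¬ r > 0 by omega]
      · rw [if_neg hr0]
        push_neg at hr0
        have hrpos : r > 0 := hr0
        simp only [trAltLoop, if_pos hrpos]
        by_cases hw : v + min r (100 - v) = 100
        · rw [if_pos hw]
          have hmin : min r (100 - v) = 100 - v := by omega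
          have hr' : r - min r (100 - v) = v + r - 100 := by omega
          rw [hr', ih 0 (c + 1) (v + r - 100) (by norm_num) (by push_cast at hr ⊢; omega)]
          have ht : v + r ≥ 100 := by omega
          by_cases hz : v + r - 100 ≤ 0
          · rw [if_pos hz]
            have h100 : v + r = 100 := by omega
            rw [if_neg (by omega), h100]
            norm_num
          · rw [if_neg hz, if_neg (by omega), if_neg (by omega)]
            have hm : (0 + (v + r - 100)) % 100 = (v + r) % 100 := by omega
            have hd : c + 1 + (0 + (v + r - 100)) / 100 = c + (v + r) / 100 := by omega
            rw [hm, hd]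
        · rw [if_neg hw]
          have hmin : min r (100 - v) = r := by omega
          rw [hmin]
          have hr' : r - r = 0 := by ring
          rw [hr', ih (v + r) c 0 (by omega) (by positivity)]
          rw [if_pos (le_refl (0 : Int))]
          by_cases hneg : v + r < 0
          · rw [if_pos hneg]
          · rw [if_neg hneg]
            have h1 : (v + r) % 100 = v + r := by omega
            have h2 : (v + r) / 100 = 0 := by omega
            rw [h1, h2, add_zero]

-- ===== VERDICT (by name: the statement is the Claim_ definition above) =====
theorem turn_right_spec : Claim_equal_turn_right := by
  intro value amount _ hpre
  show turn_right value amount = turn_right_alt value amount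
  by_cases hle0 : amount ≤ 0
  · unfold turn_right turn_right_alt
    rw [PySem.List.pyRange_one_eq_nil hle0, show amount.toNat = 0 by omega]
    rfl
  have hv : value ≤ 99 := by
    rcases hpre with h | h
    · exact h
    · omega
  unfold turn_right turn_right_alt
  rw [show (fun (st : Int × Int) (_ : Int) =>
      let v := st.1 + 1
      if v > 99 then (0, st.2 + 1) else (v, st.2)) = (fun st (_ : Int) => trStep st) from rfl]
  rw [foldl_ignore_iterate, PySem.List.length_pyRange_one,
      trStep_iterate _ value 0 hv,
      trAltLoop_closed amount.toNat value 0 amount hv (Int.self_le_toNat amount)]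
  have hn : (((amount - 0).toNat : Int)) = max amount 0 := by omega
  rw [hn]
  rw [if_neg hle0, show max amount 0 = amount by omega]
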